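-- pv_equiv track=rewrite | github.com/kklee0930/Algorithm | 프로그래머스/lv2/49993. 스킬트리/스킬트리.py | solution
-- ===== SOURCE A (Python) =====
-- def solution(skill, skill_trees):
--     trees = []
--     answer = 0
--
--     for str_ in skill_trees: # 'BACDE', 'CBADF'...
--         temp = ''
--         for c in str_:
--             if c not in skill: # skill과 관련없는 문자들은 제외처리 (예: A,E,F)
--                 continue
--             temp += c # 관련있는 문자만 temp에 추가 후 trees에 추가
--         trees.append(temp)
--
--     for t in trees: # skill과 관련있는 문자만 모은 trees 리스트 순회
--         for i in range(len(t)):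
--             if t[i] != skill[i]: # 각각 case를 순회하며 skill의 문자 순서와 맞지 않으면 어긋난 것으로 처리
--                 break
--         else:
--             answer += 1
--
--     return answer
-- ===== SOURCE B (Python) =====
-- def solution(skill, skill_trees):
--     answer = 0
--     for tree in skill_trees:
--         p = 0
--         ok = True
--         for c in tree:
--             if c in skill:
--                 if c != skill[p]:  # indexes directly: raises IndexError exactly where A does
--                     ok = False
--                     break
--                 p += 1
--         if ok:
--             answer += 1
--     return answer
-- ===== Notes on version B (the rewrite author's own statement) =====
-- stated objective: alternative
-- what changed: fuses A's two passes (build a filtered copy of each tree, then compare it index-by-index against skill) into one traversal per tree with a pointer into skill, never building the intermediate filtered string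
-- outside the precondition, e.g. on solution('CBD', ['CBDC']): A raises IndexError, B raises IndexError
import Mathlib
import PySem

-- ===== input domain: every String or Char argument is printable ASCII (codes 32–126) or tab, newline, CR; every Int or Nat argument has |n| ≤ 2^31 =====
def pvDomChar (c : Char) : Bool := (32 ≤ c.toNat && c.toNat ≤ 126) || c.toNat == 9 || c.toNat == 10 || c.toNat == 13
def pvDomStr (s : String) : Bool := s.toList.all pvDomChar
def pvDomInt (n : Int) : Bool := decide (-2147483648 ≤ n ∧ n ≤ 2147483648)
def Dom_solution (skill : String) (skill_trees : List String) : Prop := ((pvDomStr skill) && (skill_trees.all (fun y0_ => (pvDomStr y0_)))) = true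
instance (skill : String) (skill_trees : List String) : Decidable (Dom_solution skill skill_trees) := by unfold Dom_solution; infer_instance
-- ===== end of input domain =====

-- B fuses A's two passes (filter each tree, then compare the filtered copy to skill) into one
-- traversal per tree with a pointer into skill; objective: alternative (same cost, no intermediate copies).

-- ===== PORT A =====
-- inner 'for i in range(len(t)): if t[i] != skill[i]: break / else: counted'.
-- skill[i] out of range = IndexError (Python raises; excluded by Pre_; port returns false there).
def aCompare (t skill : List Char) (i : Nat) : Bool :=
  if h : i < t.length then
    match PySem.List.pyGet? skill (i : Int) with
    | none => false        -- IndexError in Python; outside Pre_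
    | some s => if t[i] ≠ s then false else aCompare t skill (i + 1)
  else true
termination_by t.length - i

-- 'temp' built by the first loop: keep c iff c in skill (single char in string = char membership; exact)
def aFilter (skill : List Char) (str_ : List Char) : List Char :=
  str_.foldl (fun temp c => if skill.contains c then temp ++ [c] else temp) []

def solution (skill : String) (skill_trees : List String) : Int :=
  let trees := skill_trees.foldl (fun trees str_ => trees ++ [aFilter skill.toList str_.toList]) []
  trees.foldl (fun answer t => if aCompare t skill.toList 0 then answer + 1 else answer) 0

-- ===== PORT B =====
-- single pass with pointer p; skill[p] indexed directly (IndexError = none, outside Pre_)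
def bCheck (skill : List Char) : List Char → Nat → Bool
  | [], _ => true
  | c :: rest, p =>
    if skill.contains c then
      match PySem.List.pyGet? skill (p : Int) with
      | none => false      -- IndexError in Python; outside Pre_
      | some s => if c ≠ s then false else bCheck skill rest (p + 1)
    else bCheck skill rest p

def solution_alt (skill : String) (skill_trees : List String) : Int :=
  skill_trees.foldl (fun answer tree => if bCheck skill.toList tree.toList 0 then answer + 1 else answer) 0

-- ===== PRECONDITION & SPEC =====
-- Pre_ excludes exactly the inputs where Python A (and B alike) raises IndexError: some tree whose
-- skill-filtered character sequence strictly extends skill itself.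
def Pre_solution (skill : String) (skill_trees : List String) : Prop :=
  ∀ t ∈ skill_trees,
    ¬ (skill.toList <+: t.toList.filter (fun c => skill.toList.contains c) ∧
       t.toList.filter (fun c => skill.toList.contains c) ≠ skill.toList)
instance (skill : String) (skill_trees : List String) : Decidable (Pre_solution skill skill_trees) := by
  unfold Pre_solution; infer_instance

def pvWitness_solution : String × List String := ("CBD", ["BACDE", "CBADF", "AECB", "BDA"])

def Spec_solution (skill : String) (skill_trees : List String) (out : Int) : Prop := out = solution_alt skill skill_trees
instance (skill : String) (skill_trees : List String) (out : Int) : Decidable (Spec_solution skill skill_trees out) := by unfold Spec_solution; infer_instance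

-- ===== CLAIM (what is proved, stated in full; the proofs are below) =====
def Claim_equal_solution : Prop := ∀ (skill : String) (skill_trees : List String), Dom_solution skill skill_trees → Pre_solution skill skill_trees → Spec_solution skill skill_trees (solution skill skill_trees)

-- ===== LEMMAS AND PROOFS =====

-- common reference shape: compare a (filtered) sequence elementwise against skill
def cmpSeq : List Char → List Char → Bool
  | [], _ => true
  | _ :: _, [] => false
  | a :: f, s :: sk => if a ≠ s then false else cmpSeq f sk

theorem aFilter_eq_filter (skill : List Char) (str_ : List Char) :
    aFilter skill str_ = str_.filter (fun c => skill.contains c) := by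
  have h : ∀ (l acc : List Char),
      l.foldl (fun temp c => if skill.contains c then temp ++ [c] else temp) acc
        = acc ++ l.filter (fun c => skill.contains c) := by
    intro l
    induction l with
    | nil => intro acc; simp
    | cons c rest ih =>
      intro acc
      rw [List.foldl_cons, List.filter_cons]
      by_cases hc : skill.contains c = true
      · rw [if_pos hc, if_pos hc, ih]; simp
      · rw [if_neg hc, if_neg hc, ih]
  simpa [aFilter] using h str_ []

theorem aCompare_eq_cmp (skill t : List Char) (i : Nat) :
    aCompare t skill i = cmpSeq (t.drop i) (skill.drop i) := by
  fun_induction aCompare t skill i with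
  | case1 i h hnone =>
    -- pyGet? = none, returns false; skill.drop i = []
    simp only [PySem.List.pyGet?_natCast] at hnone
    have hsk : skill.length ≤ i := by
      by_contra hlt
      simp [List.getElem?_eq_getElem (by omega : i < skill.length)] at hnone
    have : skill.drop i = [] := List.drop_eq_nil_of_le hsk
    rw [this]
    cases hdrop : t.drop i with
    | nil => have := List.drop_eq_nil_iff.mp hdrop; omega
    | cons a f => simp [cmpSeq]
  | case2 i h s hs hne =>
    -- mismatch, false
    simp only [PySem.List.pyGet?_natCast] at hs
    have hsk : i < skill.length := by
      by_contra hge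
      simp [List.getElem?_eq_none (by omega : skill.length ≤ i)] at hs
    rw [List.drop_eq_getElem_cons h, List.drop_eq_getElem_cons hsk]
    have hs' : skill[i] = s := by simpa [List.getElem?_eq_getElem hsk] using hs
    simp [cmpSeq, hs', hne]
  | case3 i h s hs hne ih =>
    simp only [PySem.List.pyGet?_natCast] at hs
    have hsk : i < skill.length := by
      by_contra hge
      simp [List.getElem?_eq_none (by omega : skill.length ≤ i)] at hs
    rw [List.drop_eq_getElem_cons h, List.drop_eq_getElem_cons hsk]
    have hs' : skill[i] = s := by simpa [List.getElem?_eq_getElem hsk] using hs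
    simp only [cmpSeq, hs']
    simp only [not_not] at hne
    simp [hne, ih]
  | case4 i h =>
    have : t.drop i = [] := List.drop_eq_nil_of_le (by omega)
    simp [this, cmpSeq]

theorem bCheck_eq_cmp (skill : List Char) (tree : List Char) (p : Nat) :
    bCheck skill tree p = cmpSeq (tree.filter (fun c => skill.contains c)) (skill.drop p) := by
  induction tree generalizing p with
  | nil => simp [bCheck, cmpSeq]
  | cons c rest ih =>
    by_cases hc : skill.contains c = true
    · simp only [bCheck]
      rw [if_pos hc, List.filter_cons, if_pos hc]
      simp only [PySem.List.pyGet?_natCast]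
      by_cases hp : p < skill.length
      · rw [List.getElem?_eq_getElem hp, List.drop_eq_getElem_cons hp]
        by_cases hne : c = skill[p]
        · simp [cmpSeq, hne, ih]
        · simp [cmpSeq, hne]
      · rw [List.getElem?_eq_none (by omega), List.drop_eq_nil_of_le (by omega)]
        simp [cmpSeq]
    · simp only [bCheck]
      rw [if_neg hc, List.filter_cons, if_neg hc]
      exact ih p

theorem solution_eq (skill : String) (skill_trees : List String) :
    solution skill skill_trees = solution_alt skill skill_trees := by
  unfold solution solution_alt
  have htrees : ∀ (l : List String) (acc : List (List Char)),
      l.foldl (fun trees str_ => trees ++ [aFilter skill.toList str_.toList]) acc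
        = acc ++ l.map (fun str_ => aFilter skill.toList str_.toList) := by
    intro l
    induction l with
    | nil => simp
    | cons s rest ih => intro acc; simp [List.foldl_cons, ih]
  rw [htrees, List.nil_append, List.foldl_map]
  have hpt : ∀ (s : String), aCompare (aFilter skill.toList s.toList) skill.toList 0
      = bCheck skill.toList s.toList 0 := by
    intro s
    rw [aCompare_eq_cmp, bCheck_eq_cmp, aFilter_eq_filter]
    simp
  have hfold : ∀ (l : List String) (acc : Int),
      l.foldl (fun answer t => if aCompare (aFilter skill.toList t.toList) skill.toList 0 then answer + 1 else answer) acc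
        = l.foldl (fun answer tree => if bCheck skill.toList tree.toList 0 then answer + 1 else answer) acc := by
    intro l
    induction l with
    | nil => intro acc; rfl
    | cons s rest ih => intro acc; rw [List.foldl_cons, List.foldl_cons, hpt s]; exact ih _
  exact hfold skill_trees 0

-- ===== VERDICT (by name: the statement is the Claim_ definition above) =====
theorem solution_spec : Claim_equal_solution := by
  intro skill skill_trees _ _
  unfold Spec_solution
  exact solution_eq skill skill_trees
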